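-- pv_equiv track=rewrite | github.com/myvogueai/myvogue-backend | main.py | _infer_style_from_items
-- ===== SOURCE A (Python) =====
-- def normalize_stile(s: str | None) -> str:
--     if not s:
--         return ""
--     return str(s).strip().lower()
--
-- def _infer_style_from_items(top=None, bottom=None, piece=None, shoes=None, layer=None):
--     counts: dict[str, int] = {}
--     for it in (piece, top, bottom, shoes, layer):
--         s = it and normalize_stile(it.get("stile"))
--         if s:
--             counts[s] = counts.get(s, 0) + 1
--     if not counts:
--         return ""
--     max_count = max(counts.values())
--     candidates = [s for s, n in counts.items() if n == max_count]
--     for priority in ("elegante", "streetwear", "casual", "sportivo"):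
--         if priority in candidates:
--             return priority
--     return candidates[0]
-- ===== SOURCE B (Python) =====
-- def normalize_stile(s):
--     if not s:
--         return ""
--     return str(s).strip().lower()
--
-- def _infer_style_from_items(top=None, bottom=None, piece=None, shoes=None, layer=None):
--     styles = []
--     for it in (piece, top, bottom, shoes, layer):
--         if it:
--             s = normalize_stile(it.get("stile"))
--             if s:
--                 styles.append(s)
--     if not styles:
--         return ""
--     prio = ("elegante", "streetwear", "casual", "sportivo")
--     distinct = []
--     for s in styles:
--         if s not in distinct:
--             distinct.append(s)
--     def rank(s):
--         return prio.index(s) if s in prio else 4 + distinct.index(s)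
--     return min(distinct, key=lambda s: (-styles.count(s), rank(s)))
-- ===== Notes on version B (the rewrite author's own statement) =====
-- stated objective: alternative
-- what changed: A counts styles in a dict, takes max of the counts, filters the max-count candidates and scans a priority tuple over them; B collects the style list, dedups it in first-occurrence order and picks the winner with a single min(...) over a composite key (-count, rank) where rank is the priority index for priority styles and 4+insertion position otherwise.
import Mathlib
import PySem

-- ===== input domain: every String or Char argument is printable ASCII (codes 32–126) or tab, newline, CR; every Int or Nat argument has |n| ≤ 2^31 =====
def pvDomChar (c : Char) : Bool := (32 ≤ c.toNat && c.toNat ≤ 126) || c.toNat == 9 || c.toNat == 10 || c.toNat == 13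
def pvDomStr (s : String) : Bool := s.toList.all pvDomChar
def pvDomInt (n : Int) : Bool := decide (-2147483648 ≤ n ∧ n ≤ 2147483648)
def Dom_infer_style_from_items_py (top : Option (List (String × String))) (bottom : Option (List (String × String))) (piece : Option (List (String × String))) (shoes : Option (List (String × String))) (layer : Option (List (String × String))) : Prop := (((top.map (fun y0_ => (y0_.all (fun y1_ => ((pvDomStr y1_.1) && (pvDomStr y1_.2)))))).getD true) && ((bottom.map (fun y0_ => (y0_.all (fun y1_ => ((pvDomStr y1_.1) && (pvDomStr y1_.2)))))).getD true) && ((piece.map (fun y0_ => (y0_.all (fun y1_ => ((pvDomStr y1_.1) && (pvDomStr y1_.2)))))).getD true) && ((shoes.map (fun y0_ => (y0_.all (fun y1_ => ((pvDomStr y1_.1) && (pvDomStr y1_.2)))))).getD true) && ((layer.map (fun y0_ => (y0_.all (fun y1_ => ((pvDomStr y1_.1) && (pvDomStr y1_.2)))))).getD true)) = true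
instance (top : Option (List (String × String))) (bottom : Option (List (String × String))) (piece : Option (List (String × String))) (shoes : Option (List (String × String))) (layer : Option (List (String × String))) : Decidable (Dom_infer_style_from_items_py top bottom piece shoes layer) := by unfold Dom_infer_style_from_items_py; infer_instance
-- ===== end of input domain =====

-- B replaces A's max-count filter plus priority-tuple scan by a first-occurrence dedup and a single
-- min over the composite key (-count, rank); objective: alternative decomposition (same cost).

-- ===== PORT A =====
-- shared Python helper normalize_stile (argument None → Option.none); exact on the ASCII domain
def normalize_stile_py (s : Option String) : String :=
  match s with
  | none => ""
  | some s => if s = "" then "" else PySem.Str.lower (PySem.Str.strip s)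

def infer_style_from_items_py (top : Option (List (String × String))) (bottom : Option (List (String × String))) (piece : Option (List (String × String))) (shoes : Option (List (String × String))) (layer : Option (List (String × String))) : String :=
  -- counts[s] = counts.get(s, 0) + 1 over (piece, top, bottom, shoes, layer);
  -- 's = it and normalize_stile(it.get("stile")); if s:' → falsy it (None/empty dict) and falsy s are ported as ""
  let counts : PySem.Dict String Int :=
    [piece, top, bottom, shoes, layer].foldl (fun counts it =>
      let s : String :=
        match it with
        | none => ""
        | some l => if l.isEmpty then "" else normalize_stile_py ((PySem.Dict.mk l).get? "stile")
      if s ≠ "" then counts.insert s (counts.getD s 0 + 1) else counts) PySem.Dict.empty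
  if counts.items.isEmpty then ""
  else
    -- max(counts.values()): values nonempty here, so the getD 0 default is unreachable
    let max_count : Int := (PySem.List.max? counts.values (fun v => v)).getD 0
    let candidates : List String := (counts.items.filter (fun p => p.2 == max_count)).map Prod.fst
    -- the 'for priority in (...)' loop over the literal 4-tuple, unrolled
    if candidates.contains "elegante" then "elegante"
    else if candidates.contains "streetwear" then "streetwear"
    else if candidates.contains "casual" then "casual"
    else if candidates.contains "sportivo" then "sportivo"
    else candidates.headD ""   -- candidates[0]; candidates nonempty here, default unreachable

-- ===== PORT B =====
def infer_style_from_items_py_alt (top : Option (List (String × String))) (bottom : Option (List (String × String))) (piece : Option (List (String × String))) (shoes : Option (List (String × String))) (layer : Option (List (String × String))) : String :=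
  let styles : List String :=
    [piece, top, bottom, shoes, layer].foldl (fun acc it =>
      match it with
      | none => acc
      | some l =>
        if l.isEmpty then acc
        else
          let s := normalize_stile_py ((PySem.Dict.mk l).get? "stile")
          if s = "" then acc else acc ++ [s]) []
  if styles.isEmpty then ""
  else
    let prio : List String := ["elegante", "streetwear", "casual", "sportivo"]
    let distinct : List String := styles.foldl (fun d s => if d.contains s then d else d ++ [s]) []
    let rank : String → Int := fun s =>
      match PySem.List.index? prio s with
      | some i => (i : Int)
      | none => 4 + ((PySem.List.index? distinct s).getD 0 : Int)  -- s ∈ distinct whenever rank is used, default unreachable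
    (PySem.List.min2? distinct (fun s => -(styles.count s : Int)) rank).getD ""  -- distinct nonempty here, default unreachable

-- ===== PRECONDITION & SPEC =====
def Spec_infer_style_from_items_py (top : Option (List (String × String))) (bottom : Option (List (String × String))) (piece : Option (List (String × String))) (shoes : Option (List (String × String))) (layer : Option (List (String × String))) (out : String) : Prop := out = infer_style_from_items_py_alt top bottom piece shoes layer
instance (top : Option (List (String × String))) (bottom : Option (List (String × String))) (piece : Option (List (String × String))) (shoes : Option (List (String × String))) (layer : Option (List (String × String))) (out : String) : Decidable (Spec_infer_style_from_items_py top bottom piece shoes layer out) := by unfold Spec_infer_style_from_items_py; infer_instance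

-- ===== CLAIM (what is proved, stated in full; the proofs are below) =====
def Claim_equal_infer_style_from_items_py : Prop := ∀ (top : Option (List (String × String))) (bottom : Option (List (String × String))) (piece : Option (List (String × String))) (shoes : Option (List (String × String))) (layer : Option (List (String × String))), Dom_infer_style_from_items_py top bottom piece shoes layer → Spec_infer_style_from_items_py top bottom piece shoes layer (infer_style_from_items_py top bottom piece shoes layer)

-- ===== LEMMAS AND PROOFS =====

-- the per-item style both loops compute
def pvSty (it : Option (List (String × String))) : String :=
  match it with
  | none => ""
  | some l => if l.isEmpty then "" else normalize_stile_py ((PySem.Dict.mk l).get? "stile")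

def pvStyles (its : List (Option (List (String × String)))) : List String :=
  (its.map pvSty).filter (fun s => s ≠ "")

def pvPrio : List String := ["elegante", "streetwear", "casual", "sportivo"]

-- the rank B's key uses, over the dedup list D
def pvRnk (D : List String) (s : String) : Int :=
  match PySem.List.index? pvPrio s with
  | some i => (i : Int)
  | none => 4 + ((PySem.List.index? D s).getD 0 : Int)

lemma foldA_eq (its : List (Option (List (String × String)))) (d : PySem.Dict String Int) :
    its.foldl (fun counts it =>
      let s : String :=
        match it with
        | none => ""
        | some l => if l.isEmpty then "" else normalize_stile_py ((PySem.Dict.mk l).get? "stile")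
      if s ≠ "" then counts.insert s (counts.getD s 0 + 1) else counts) d
    = (pvStyles its).foldl (fun d s => d.insert s (d.getD s 0 + 1)) d := by
  induction its generalizing d with
  | nil => simp [pvStyles]
  | cons it its ih =>
    rw [List.foldl_cons, ih]
    have hstep : (let s : String :=
        match it with
        | none => ""
        | some l => if l.isEmpty then "" else normalize_stile_py ((PySem.Dict.mk l).get? "stile")
      if s ≠ "" then d.insert s (d.getD s 0 + 1) else d)
        = if pvSty it = "" then d else d.insert (pvSty it) (d.getD (pvSty it) 0 + 1) := by
      by_cases h : pvSty it = "" <;> simp [pvSty] at h ⊢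
    rw [hstep]
    have hsty : pvStyles (it :: its) = if pvSty it = "" then pvStyles its else pvSty it :: pvStyles its := by
      by_cases h : pvSty it = "" <;> simp [pvStyles, h]
    rw [hsty]
    by_cases h : pvSty it = "" <;> simp [h]


lemma foldB_eq (its : List (Option (List (String × String)))) (acc : List String) :
    its.foldl (fun acc it =>
      match it with
      | none => acc
      | some l =>
        if l.isEmpty then acc
        else
          let s := normalize_stile_py ((PySem.Dict.mk l).get? "stile")
          if s = "" then acc else acc ++ [s]) acc
    = acc ++ pvStyles its := by
  induction its generalizing acc with
  | nil => simp [pvStyles]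
  | cons it its ih =>
    rw [List.foldl_cons]
    have hstep : (match it with
      | none => acc
      | some l =>
        if l.isEmpty then acc
        else
          let s := normalize_stile_py ((PySem.Dict.mk l).get? "stile")
          if s = "" then acc else acc ++ [s]) = if pvSty it = "" then acc else acc ++ [pvSty it] := by
      cases it with
      | none => simp [pvSty]
      | some l => by_cases hl : l.isEmpty <;> simp [pvSty, hl]
    rw [hstep, ih]
    have hsty : pvStyles (it :: its) = if pvSty it = "" then pvStyles its else pvSty it :: pvStyles its := by
      by_cases h : pvSty it = "" <;> simp [pvStyles, h]
    rw [hsty]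
    by_cases h : pvSty it = "" <;> simp [h]


lemma distinct_eq (styles : List String) :
    styles.foldl (fun d s => if d.contains s then d else d ++ [s]) [] = PySem.Set.ofList styles := rfl

lemma min2_fold {α : Type} (xs : List α) (k1 k2 : α → Int) (m0 : α) :
    ∃ m, xs.foldl (fun acc x =>
      match acc with
      | none => some x
      | some m =>
        if (decide (k1 x < k1 m) || !decide (k1 m < k1 x) && decide (k2 x < k2 m)) = true then some x else some m)
      (some m0) = some m ∧ (m = m0 ∨ m ∈ xs) ∧
      (k1 m ≤ k1 m0 ∧ (k1 m = k1 m0 → k2 m ≤ k2 m0)) ∧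
      ∀ y ∈ xs, k1 m ≤ k1 y ∧ (k1 m = k1 y → k2 m ≤ k2 y) := by
  induction xs generalizing m0 with
  | nil => exact ⟨m0, rfl, Or.inl rfl, ⟨le_refl _, fun _ => le_refl _⟩, by simp⟩
  | cons x xs ih =>
    rw [List.foldl_cons]
    by_cases hrep : (decide (k1 x < k1 m0) || !decide (k1 m0 < k1 x) && decide (k2 x < k2 m0)) = true
    · simp only [hrep, if_pos]
      obtain ⟨m, hm, hmem, hle, hall⟩ := ih x
      simp only [Bool.or_eq_true, decide_eq_true_eq, Bool.and_eq_true, Bool.not_eq_true',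
        decide_eq_false_iff_not, not_lt] at hrep
      refine ⟨m, hm, ?_, ⟨?_, ?_⟩, ?_⟩
      · rcases hmem with h|h
        · exact Or.inr (h ▸ List.mem_cons_self)
        · exact Or.inr (List.mem_cons_of_mem _ h)
      · rcases hrep with h|⟨h1,h2⟩ <;> linarith [hle.1]
      · intro heq
        rcases hrep with h|⟨h1,h2⟩
        · linarith [hle.1]
        · have hx0 : k1 x = k1 m0 := by linarith [hle.1]
          have := hle.2 (by linarith)
          linarith
      · intro y hy
        rcases List.mem_cons.mp hy with rfl | hy
        · exact hle
        · exact hall y hy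
    · simp only [if_neg hrep]
      obtain ⟨m, hm, hmem, hle, hall⟩ := ih m0
      simp only [Bool.or_eq_true, decide_eq_true_eq, Bool.and_eq_true, Bool.not_eq_true',
        decide_eq_false_iff_not, not_or, not_and, not_lt] at hrep
      obtain ⟨h1, h2⟩ := hrep
      refine ⟨m, hm, ?_, hle, ?_⟩
      · rcases hmem with h|h
        · exact Or.inl h
        · exact Or.inr (List.mem_cons_of_mem _ h)
      · intro y hy
        rcases List.mem_cons.mp hy with rfl | hy
        · constructor
          · linarith [hle.1]
          · intro heq
            have hy0 : k1 y = k1 m0 := by linarith [hle.1]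
            have h2' := h2 (by linarith)
            have := hle.2 (by linarith)
            linarith
        · exact hall y hy

lemma min2_char {α : Type} (xs : List α) (k1 k2 : α → Int) (h : xs ≠ []) :
    ∃ m, PySem.List.min2? xs k1 k2 = some m ∧ m ∈ xs ∧
      ∀ y ∈ xs, k1 m ≤ k1 y ∧ (k1 m = k1 y → k2 m ≤ k2 y) := by
  cases xs with
  | nil => exact absurd rfl h
  | cons x xs =>
    unfold PySem.List.min2?
    rw [List.foldl_cons]
    obtain ⟨m, hm, hmem, hle, hall⟩ := min2_fold xs k1 k2 x
    refine ⟨m, hm, ?_, ?_⟩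
    · rcases hmem with rfl|h'
      · exact List.mem_cons_self
      · exact List.mem_cons_of_mem _ h'
    · intro y hy
      rcases List.mem_cons.mp hy with rfl | hy
      · exact hle
      · exact hall y hy

lemma idx_head_filter {D : List String} (hD : D.Nodup) {p : String → Bool} {h : String} {t : List String}
    (hf : D.filter p = h :: t) :
    ∀ y ∈ D.filter p, (PySem.List.index? D h).getD 0 ≤ (PySem.List.index? D y).getD 0 := by
  induction D with
  | nil => simp at hf
  | cons a D ih =>
    have hna : a ∉ D := (List.nodup_cons.mp hD).1
    have hDn : D.Nodup := (List.nodup_cons.mp hD).2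
    by_cases hpa : p a
    · -- filter = a :: filter D, h = a
      rw [List.filter_cons_of_pos hpa] at hf ⊢
      obtain ⟨rfl, rfl⟩ : a = h ∧ D.filter p = t := by
        constructor <;> [exact (List.cons.injEq .. ▸ hf).1 ; exact (List.cons.injEq .. ▸ hf).2]
      intro y hy
      rw [PySem.List.index?_cons_self]
      simp
    · rw [List.filter_cons_of_neg hpa] at hf ⊢
      intro y hy
      have hyD : y ∈ D := List.mem_of_mem_filter hy
      have hhD : h ∈ D := List.mem_of_mem_filter (hf ▸ List.mem_cons_self)
      have hya : y ≠ a := fun e => hna (e ▸ hyD)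
      have hha : h ≠ a := fun e => hna (e ▸ hhD)
      rw [PySem.List.index?_cons_of_ne D (Ne.symm hha), PySem.List.index?_cons_of_ne D (Ne.symm hya)]
      obtain ⟨ihv, hiv⟩ := Option.isSome_iff_exists.mp ((PySem.List.index?_isSome_iff D h).mpr hhD)
      obtain ⟨iyv, hiy⟩ := Option.isSome_iff_exists.mp ((PySem.List.index?_isSome_iff D y).mpr hyD)
      have := ih hDn hf y hy
      rw [hiv, hiy] at this ⊢
      simpa using this


lemma rnk_inj {D : List String} {a b : String} (ha : a ∈ D) (hb : b ∈ D)
    (h : pvRnk D a = pvRnk D b) : a = b := by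
  unfold pvRnk at h
  cases hia : PySem.List.index? pvPrio a with
  | some i =>
    cases hib : PySem.List.index? pvPrio b with
    | some j =>
      rw [hia, hib] at h
      simp only [] at h
      have hij : i = j := by exact_mod_cast h
      obtain ⟨hk, hval, _⟩ := PySem.List.getElem_of_index?_eq_some hia
      obtain ⟨hk', hval', _⟩ := PySem.List.getElem_of_index?_eq_some hib
      subst hij
      rw [← hval, ← hval']
    | none =>
      rw [hia, hib] at h
      simp only [] at h
      obtain ⟨hk, _, _⟩ := PySem.List.getElem_of_index?_eq_some hia
      have : i < 4 := by simpa [pvPrio] using hk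
      have hcast : (0:Int) ≤ ((PySem.List.index? D b).getD 0 : Int) := by positivity
      omega
  | none =>
    cases hib : PySem.List.index? pvPrio b with
    | some j =>
      rw [hia, hib] at h
      simp only [] at h
      obtain ⟨hk, _, _⟩ := PySem.List.getElem_of_index?_eq_some hib
      have : j < 4 := by simpa [pvPrio] using hk
      have hcast : (0:Int) ≤ ((PySem.List.index? D a).getD 0 : Int) := by positivity
      omega
    | none =>
      rw [hia, hib] at h
      simp only [] at h
      obtain ⟨ia, hia'⟩ := Option.isSome_iff_exists.mp ((PySem.List.index?_isSome_iff D a).mpr ha)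
      obtain ⟨ib, hib'⟩ := Option.isSome_iff_exists.mp ((PySem.List.index?_isSome_iff D b).mpr hb)
      rw [hia', hib'] at h
      have hij : ia = ib := by simp at h; exact_mod_cast h
      obtain ⟨hk, hval, _⟩ := PySem.List.getElem_of_index?_eq_some hia'
      obtain ⟨hk', hval', _⟩ := PySem.List.getElem_of_index?_eq_some hib'
      subst hij
      rw [← hval, ← hval']


lemma rnk_nonneg (D : List String) (y : String) : 0 ≤ pvRnk D y := by
  unfold pvRnk
  cases h : PySem.List.index? pvPrio y <;> simp
  omega

lemma rnk_cases (D : List String) (y : String) :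
    (y = "elegante" ∧ pvRnk D y = 0) ∨ (y = "streetwear" ∧ pvRnk D y = 1) ∨
    (y = "casual" ∧ pvRnk D y = 2) ∨ (y = "sportivo" ∧ pvRnk D y = 3) ∨
    (y ∉ pvPrio ∧ 4 ≤ pvRnk D y) := by
  by_cases hy : y ∈ pvPrio
  · simp only [pvPrio, List.mem_cons, List.not_mem_nil, or_false] at hy
    rcases hy with rfl | rfl | rfl | rfl
    · exact Or.inl ⟨rfl, by unfold pvRnk; rw [show PySem.List.index? pvPrio "elegante" = some 0 from by decide]; simp⟩
    · exact Or.inr (Or.inl ⟨rfl, by unfold pvRnk; rw [show PySem.List.index? pvPrio "streetwear" = some 1 from by decide]; simp⟩)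
    · exact Or.inr (Or.inr (Or.inl ⟨rfl, by unfold pvRnk; rw [show PySem.List.index? pvPrio "casual" = some 2 from by decide]; simp⟩))
    · exact Or.inr (Or.inr (Or.inr (Or.inl ⟨rfl, by unfold pvRnk; rw [show PySem.List.index? pvPrio "sportivo" = some 3 from by decide]; simp⟩)))
  · refine Or.inr (Or.inr (Or.inr (Or.inr ⟨hy, ?_⟩)))
    unfold pvRnk
    rw [(PySem.List.index?_eq_none_iff pvPrio y).mpr hy]
    simp

lemma rnk_of_not_prio {D : List String} {y : String} (hy : y ∉ pvPrio) :
    pvRnk D y = 4 + ((PySem.List.index? D y).getD 0 : Int) := by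
  unfold pvRnk
  rw [(PySem.List.index?_eq_none_iff pvPrio y).mpr hy]

-- the unrolled priority chain picks the member of cand = D.filter p with minimal pvRnk
lemma chain_min (D : List String) (hD : D.Nodup) (p : String → Bool) (hne : D.filter p ≠ []) :
    (if (D.filter p).contains "elegante" then "elegante"
     else if (D.filter p).contains "streetwear" then "streetwear"
     else if (D.filter p).contains "casual" then "casual"
     else if (D.filter p).contains "sportivo" then "sportivo"
     else (D.filter p).headD "") ∈ D.filter p ∧
    ∀ y ∈ D.filter p, pvRnk D (if (D.filter p).contains "elegante" then "elegante"
     else if (D.filter p).contains "streetwear" then "streetwear"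
     else if (D.filter p).contains "casual" then "casual"
     else if (D.filter p).contains "sportivo" then "sportivo"
     else (D.filter p).headD "") ≤ pvRnk D y := by
  have e0 : pvRnk D "elegante" = 0 := by
    unfold pvRnk; rw [show PySem.List.index? pvPrio "elegante" = some 0 from by decide]; simp
  have e1 : pvRnk D "streetwear" = 1 := by
    unfold pvRnk; rw [show PySem.List.index? pvPrio "streetwear" = some 1 from by decide]; simp
  have e2 : pvRnk D "casual" = 2 := by
    unfold pvRnk; rw [show PySem.List.index? pvPrio "casual" = some 2 from by decide]; simp
  have e3 : pvRnk D "sportivo" = 3 := by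
    unfold pvRnk; rw [show PySem.List.index? pvPrio "sportivo" = some 3 from by decide]; simp
  by_cases h0 : (D.filter p).contains "elegante"
  · rw [if_pos h0]
    refine ⟨by simpa using h0, fun y _ => ?_⟩
    rw [e0]; exact rnk_nonneg D y
  · rw [if_neg h0]
    have h0' : "elegante" ∉ D.filter p := by simpa using h0
    by_cases h1 : (D.filter p).contains "streetwear"
    · rw [if_pos h1]
      refine ⟨by simpa using h1, fun y hy => ?_⟩
      rw [e1]
      rcases rnk_cases D y with ⟨rfl, _⟩ | ⟨_, hr⟩ | ⟨_, hr⟩ | ⟨_, hr⟩ | ⟨_, hr⟩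
      · exact absurd hy h0'
      all_goals omega
    · rw [if_neg h1]
      have h1' : "streetwear" ∉ D.filter p := by simpa using h1
      by_cases h2 : (D.filter p).contains "casual"
      · rw [if_pos h2]
        refine ⟨by simpa using h2, fun y hy => ?_⟩
        rw [e2]
        rcases rnk_cases D y with ⟨rfl, _⟩ | ⟨rfl, _⟩ | ⟨_, hr⟩ | ⟨_, hr⟩ | ⟨_, hr⟩
        · exact absurd hy h0'
        · exact absurd hy h1'
        all_goals omega
      · rw [if_neg h2]
        have h2' : "casual" ∉ D.filter p := by simpa using h2
        by_cases h3 : (D.filter p).contains "sportivo"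
        · rw [if_pos h3]
          refine ⟨by simpa using h3, fun y hy => ?_⟩
          rw [e3]
          rcases rnk_cases D y with ⟨rfl, _⟩ | ⟨rfl, _⟩ | ⟨rfl, _⟩ | ⟨_, hr⟩ | ⟨_, hr⟩
          · exact absurd hy h0'
          · exact absurd hy h1'
          · exact absurd hy h2'
          all_goals omega
        · rw [if_neg h3]
          have h3' : "sportivo" ∉ D.filter p := by simpa using h3
          obtain ⟨h, t, hf⟩ : ∃ h t, D.filter p = h :: t := by
            cases hc : D.filter p with
            | nil => exact absurd hc hne
            | cons a l => exact ⟨a, l, rfl⟩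
          have hnp : ∀ y ∈ D.filter p, y ∉ pvPrio := by
            intro y hy hyp
            simp only [pvPrio, List.mem_cons, List.not_mem_nil, or_false] at hyp
            rcases hyp with rfl | rfl | rfl | rfl
            · exact h0' hy
            · exact h1' hy
            · exact h2' hy
            · exact h3' hy
          rw [hf]
          simp only [List.headD_cons]
          have hhmem : h ∈ D.filter p := hf ▸ List.mem_cons_self
          refine ⟨hf ▸ hhmem, fun y hy => ?_⟩
          rw [rnk_of_not_prio (hnp h hhmem), rnk_of_not_prio (hnp y (hf ▸ hy))]
          have := idx_head_filter hD hf y (hf ▸ hy)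
          omega

-- the selection parts agree on a nonempty style list
lemma select_eq (styles : List String) (hne : styles ≠ []) :
    (let counts := PySem.Dict.counter styles
     let max_count : Int := (PySem.List.max? counts.values (fun v => v)).getD 0
     let candidates := (counts.items.filter (fun p => p.2 == max_count)).map Prod.fst
     if candidates.contains "elegante" then "elegante"
     else if candidates.contains "streetwear" then "streetwear"
     else if candidates.contains "casual" then "casual"
     else if candidates.contains "sportivo" then "sportivo"
     else candidates.headD "")
    = (PySem.List.min2? (PySem.Set.ofList styles) (fun s => -(styles.count s : Int)) (pvRnk (PySem.Set.ofList styles))).getD "" := by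
  simp only []
  set D := PySem.Set.ofList styles with hDdef
  have hDn : D.Nodup := PySem.Set.nodup_ofList styles
  have hDne : D ≠ [] := by
    cases styles with
    | nil => exact absurd rfl hne
    | cons a l =>
      intro hD0
      have : a ∈ D := (PySem.Set.mem_ofList _ _).mpr List.mem_cons_self
      rw [hD0] at this
      exact List.not_mem_nil this
  have hitems : (PySem.Dict.counter styles).items = D.map (fun k => (k, (List.count k styles : Int))) :=
    PySem.Dict.items_counter styles
  have hvalues : (PySem.Dict.counter styles).values = D.map (fun k => (List.count k styles : Int)) := by
    show (PySem.Dict.counter styles).items.map Prod.snd = _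
    rw [hitems, List.map_map]
    rfl
  set M : Int := (PySem.List.max? (PySem.Dict.counter styles).values (fun v => v)).getD 0 with hMdef
  have hvne : (PySem.Dict.counter styles).values ≠ [] := by
    rw [hvalues]
    simp only [ne_eq, List.map_eq_nil_iff]
    exact hDne
  obtain ⟨M', hM'⟩ : ∃ m, PySem.List.max? (PySem.Dict.counter styles).values (fun v => v) = some m := by
    cases hm : PySem.List.max? (PySem.Dict.counter styles).values (fun v => v) with
    | none => exact absurd ((PySem.List.max?_eq_none_iff _ _).mp hm) hvne
    | some m => exact ⟨m, rfl⟩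
  have hMM : M = M' := by rw [hMdef, hM']; rfl
  have hub : ∀ k ∈ D, (List.count k styles : Int) ≤ M := by
    intro k hk
    rw [hMM]
    exact PySem.List.max?_isMax hM' _ (hvalues ▸ List.mem_map_of_mem hk)
  obtain ⟨k0, hk0D, hk0⟩ : ∃ k0 ∈ D, (List.count k0 styles : Int) = M := by
    have := PySem.List.max?_mem hM'
    rw [hvalues] at this
    obtain ⟨k0, hk0, hv⟩ := List.mem_map.mp this
    exact ⟨k0, hk0, by rw [hMM, hv]⟩
  set p : String → Bool := fun k => ((List.count k styles : Int) == M) with hpdef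
  have hcand : ((PySem.Dict.counter styles).items.filter (fun q => q.2 == M)).map Prod.fst = D.filter p := by
    rw [hitems, List.filter_map, List.map_map]
    simp only [Function.comp_def, hpdef]
    exact List.map_id _
  rw [hcand]
  have hcne : D.filter p ≠ [] := by
    intro h0
    have : k0 ∈ D.filter p := List.mem_filter.mpr ⟨hk0D, by simp [hpdef, hk0]⟩
    rw [h0] at this
    exact List.not_mem_nil this
  obtain ⟨hrmem, hrmin⟩ := chain_min D hDn p hcne
  obtain ⟨m, hmeq, hmD, hmmin⟩ := min2_char D (fun s => -(List.count s styles : Int)) (pvRnk D) hDne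
  rw [hmeq]
  simp only [Option.getD_some]
  -- m has maximal count
  have hmcount : (List.count m styles : Int) = M := by
    have h1 := (hmmin k0 hk0D).1
    simp only [neg_le_neg_iff] at h1
    have h2 := hub m hmD
    omega
  have hmcand : m ∈ D.filter p := List.mem_filter.mpr ⟨hmD, by simp [hpdef, hmcount]⟩
  -- the chain result r
  set r := (if (D.filter p).contains "elegante" then "elegante"
     else if (D.filter p).contains "streetwear" then "streetwear"
     else if (D.filter p).contains "casual" then "casual"
     else if (D.filter p).contains "sportivo" then "sportivo"
     else (D.filter p).headD "") with hrdef
  have hrD : r ∈ D := List.mem_of_mem_filter hrmem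
  have hrcount : (List.count r styles : Int) = M := by
    have := (List.mem_filter.mp hrmem).2
    simpa [hpdef] using this
  have h1 : pvRnk D r ≤ pvRnk D m := hrmin m hmcand
  have h2 : pvRnk D m ≤ pvRnk D r := by
    have := (hmmin r hrD).2
    simp only [neg_inj] at this
    exact this (by omega)
  exact rnk_inj hrD hmD (le_antisymm h1 h2)

-- ===== VERDICT (by name: the statement is the Claim_ definition above) =====
theorem infer_style_from_items_py_spec : Claim_equal_infer_style_from_items_py := by
  intro top bottom piece shoes layer _
  unfold Spec_infer_style_from_items_py infer_style_from_items_py infer_style_from_items_py_alt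
  simp only [foldA_eq, foldB_eq, distinct_eq, List.nil_append,
    PySem.Dict.foldl_insert_getD_add_one_eq_counter]
  set styles := pvStyles [piece, top, bottom, shoes, layer] with hstydef
  by_cases hs : styles = []
  · rw [hs]
    rfl
  · have hset : PySem.Set.ofList styles ≠ [] := by
      cases hc : styles with
      | nil => exact absurd hc hs
      | cons a l =>
        intro h0
        have : a ∈ PySem.Set.ofList styles := (PySem.Set.mem_ofList _ _).mpr (by rw [hc]; exact List.mem_cons_self)
        rw [hc, h0] at this
        exact List.not_mem_nil this
    have hA : ¬ ((PySem.Dict.counter styles).items.isEmpty = true) := by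
      rw [PySem.Dict.items_counter]
      simp only [List.isEmpty_iff, List.map_eq_nil_iff]
      exact hset
    have hB : ¬ (styles.isEmpty = true) := by
      simp only [List.isEmpty_iff]
      exact hs
    rw [if_neg hA, if_neg hB]
    exact select_eq styles hs
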